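-- pv_equiv track=rewrite | github.com/makalin/aetherspeak | aetherspeak/utils/symbolic.py | validate_symbolic_structure
-- ===== SOURCE A (Python) =====
-- def validate_symbolic_structure(symbolic_repr: str) -> bool:
--     """
--     Validate a symbolic representation.
--
--     Args:
--         symbolic_repr: Symbolic representation string
--
--     Returns:
--         True if valid, False otherwise
--     """
--     if not symbolic_repr or symbolic_repr == "NO_SYMBOLS":
--         return True
--
--     try:
--         parts = symbolic_repr.split("|")
--         for part in parts:
--             if ":" not in part:
--                 return False
--
--             category, type_name, data = part.split(":", 2)
--             if category not in ['L', 'M', 'S']: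
--                 return False
--
--     except Exception:
--         return False
--
--     return True
-- ===== SOURCE B (Python) =====
-- def validate_symbolic_structure(symbolic_repr: str) -> bool:
--     """Validate a symbolic representation (single-pass predicate form)."""
--     if not symbolic_repr or symbolic_repr == "NO_SYMBOLS":
--         return True
--     return all(p[:2] in ("L:", "M:", "S:") and ":" in p[2:]
--                for p in symbolic_repr.split("|"))
-- ===== Notes on version B (the rewrite author's own statement) =====
-- stated objective: idiomatic
-- what changed: Replaces A's per-part split-on-colon with maxsplit, tuple unpacking and try/except loop by a single all() over a per-part predicate that checks the two-character category prefix against the three allowed ones and requires a second colon in the remainder.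
import Mathlib
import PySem

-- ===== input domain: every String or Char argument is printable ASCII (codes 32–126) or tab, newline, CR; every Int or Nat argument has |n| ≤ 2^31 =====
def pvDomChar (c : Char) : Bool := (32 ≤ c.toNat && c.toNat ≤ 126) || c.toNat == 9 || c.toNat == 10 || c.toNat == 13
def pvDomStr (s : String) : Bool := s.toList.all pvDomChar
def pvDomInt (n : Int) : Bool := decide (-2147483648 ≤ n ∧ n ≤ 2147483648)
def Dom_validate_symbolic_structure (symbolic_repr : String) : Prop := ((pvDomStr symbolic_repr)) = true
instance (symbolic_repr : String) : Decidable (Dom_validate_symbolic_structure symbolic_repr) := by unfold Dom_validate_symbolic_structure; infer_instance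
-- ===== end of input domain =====

-- B replaces A's split(":",2)/unpack/try-except loop by a single all() over a per-part
-- prefix/membership predicate (idiomatic; same cost).


-- ===== PORT A =====
-- A's loop body for one part (exact on List Char, per the PySem convention):
-- "if ':' not in part: return False"; then part.split(":", 2); a 2-element result is the
-- unpacking ValueError caught by the except (→ False); then "category not in ['L','M','S']".
def partA (p : List Char) : Bool :=
  if PySem.Chars.isIn [':'] p = false then false
  else
    match PySem.Chars.splitMax? p [':'] 2 with
    | some [category, _type_name, _data] => decide (category ∈ [['L'], ['M'], ['S']])
    | _ => false

def goA : List (List Char) → Bool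
  | [] => true
  | p :: rest => if partA p then goA rest else false

def validate_symbolic_structure (symbolic_repr : String) : Bool :=
  if symbolic_repr = "" ∨ symbolic_repr = "NO_SYMBOLS" then true
  else goA (PySem.Chars.splitOn symbolic_repr.toList ['|'])

-- ===== PORT B =====
-- Source B's per-part predicate: p[:2] in ("L:", "M:", "S:") and ":" in p[2:]
-- (p[:2] = List.take 2, p[2:] = List.drop 2 — Python slices never raise).
def altPart (p : List Char) : Bool :=
  decide (p.take 2 ∈ [['L', ':'], ['M', ':'], ['S', ':']]) && PySem.Chars.isIn [':'] (p.drop 2)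

def validate_symbolic_structure_alt (symbolic_repr : String) : Bool :=
  if symbolic_repr = "" ∨ symbolic_repr = "NO_SYMBOLS" then true
  else (PySem.Chars.splitOn symbolic_repr.toList ['|']).all altPart

-- ===== PRECONDITION & SPEC =====
def Spec_validate_symbolic_structure (symbolic_repr : String) (out : Bool) : Prop := out = validate_symbolic_structure_alt symbolic_repr
instance (symbolic_repr : String) (out : Bool) : Decidable (Spec_validate_symbolic_structure symbolic_repr out) := by unfold Spec_validate_symbolic_structure; infer_instance

-- ===== CLAIM (what is proved, stated in full; the proofs are below) =====
def Claim_equal_validate_symbolic_structure : Prop := ∀ (symbolic_repr : String), Dom_validate_symbolic_structure symbolic_repr → Spec_validate_symbolic_structure symbolic_repr (validate_symbolic_structure symbolic_repr)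

-- ===== LEMMAS AND PROOFS =====

-- Reference splitter: split l on ':' at most m times (what splitOnMax computes for sep [':']).
def spCol : Nat → List Char → List (List Char)
  | _, [] => [[]]
  | m, c :: rest =>
    if c = ':' ∧ m ≠ 0 then [] :: spCol (m - 1) rest
    else
      match spCol m rest with
      | h :: t => (c :: h) :: t
      | [] => [[c]]

theorem spCol_ne_nil (m : Nat) (l : List Char) : spCol m l ≠ [] := by
  induction l generalizing m with
  | nil => simp [spCol]
  | cons c rest ih =>
    simp only [spCol]
    split
    · simp
    · cases h : spCol m rest <;> simp

theorem spCol_zero (l : List Char) : spCol 0 l = [l] := by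
  induction l with
  | nil => simp [spCol]
  | cons c rest ih => simp [spCol, ih]

theorem go_spec (fuel : Nat) : ∀ (m : Nat) (l cur : List Char) (acc : List (List Char))
    (h : List Char) (t : List (List Char)), l.length < fuel → spCol m l = h :: t →
    PySem.Chars.splitOnMax.go [':'] fuel m l cur acc
      = acc.reverse ++ (cur.reverse ++ h) :: t := by
  induction fuel with
  | zero => intro m l cur acc h t hf _; simp at hf
  | succ n ih =>
    intro m l cur acc h t hf hs
    rw [PySem.Chars.splitOnMax.go.eq_def]
    cases l with
    | nil =>
      simp [spCol] at hs
      simp [hs.1, hs.2]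
    | cons c rest =>
      simp only []
      by_cases hm : m = 0
      · subst hm
        rw [spCol_zero] at hs
        injection hs with h1 h2
        simp [h1, ← h2]
      · simp only [if_neg hm]
        by_cases hc : c = ':'
        · have hpre : List.isPrefixOf [':'] (c :: rest) = true := by simp [List.isPrefixOf, hc]
          rw [if_pos hpre]
          have hs2 : ([] : List Char) :: spCol (m - 1) rest = h :: t := by
            rw [← hs]; simp [spCol, hc, hm]
          obtain ⟨h', t', hst⟩ : ∃ h' t', spCol (m - 1) rest = h' :: t' := by
            cases hx : spCol (m - 1) rest with
            | nil => exact absurd hx (spCol_ne_nil _ _)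
            | cons a b => exact ⟨a, b, rfl⟩
          rw [hst] at hs2
          injection hs2 with h1 h2
          have hdrop : List.drop [':'].length (c :: rest) = rest := rfl
          rw [hdrop, ih (m - 1) rest [] (cur.reverse :: acc) h' t'
              (by simp at hf ⊢; omega) hst]
          simp [← h1, ← h2]
        · have hpre : List.isPrefixOf [':'] (c :: rest) = false := by
            simp [List.isPrefixOf]; exact fun hh => hc hh.symm
          rw [if_neg (by simp [hpre])]
          have hs2 : (match spCol m rest with
              | h :: t => (c :: h) :: t
              | [] => [[c]]) = h :: t := by
            rw [← hs]; simp [spCol, hc]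
          obtain ⟨h', t', hst⟩ : ∃ h' t', spCol m rest = h' :: t' := by
            cases hx : spCol m rest with
            | nil => exact absurd hx (spCol_ne_nil _ _)
            | cons a b => exact ⟨a, b, rfl⟩
          rw [hst] at hs2
          injection hs2 with h1 h2
          rw [ih m rest (c :: cur) acc h' t' (by simp at hf ⊢; omega) hst]
          simp [← h1, ← h2]

theorem splitOnMax_eq_spCol (p : List Char) :
    PySem.Chars.splitOnMax p [':'] 2 = spCol 2 p := by
  obtain ⟨h, t, hst⟩ : ∃ h t, spCol 2 p = h :: t := by
    cases hx : spCol 2 p with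
    | nil => exact absurd hx (spCol_ne_nil _ _)
    | cons a b => exact ⟨a, b, rfl⟩
  unfold PySem.Chars.splitOnMax
  rw [if_neg (by norm_num)]
  show PySem.Chars.splitOnMax.go [':'] (p.length + 1) 2 p [] [] = spCol 2 p
  rw [go_spec (p.length + 1) 2 p [] [] h t (Nat.lt_succ_self _) (by simpa using hst)]
  simp [hst]

theorem isin_single (a : Char) (l : List Char) :
    PySem.Chars.isIn [a] l = l.contains a := by
  by_cases h : a ∈ l
  · have h1 : PySem.Chars.isIn [a] l = true := by
      rw [PySem.Chars.isIn_iff_infix]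
      obtain ⟨s, t, rfl⟩ := List.append_of_mem h
      exact ⟨s, t, by simp⟩
    simp [h1, h]
  · have h2 : PySem.Chars.isIn [a] l = false := by
      rw [PySem.Chars.isIn_eq_false_iff]
      intro hin
      exact h (List.singleton_sublist.mp hin.sublist)
    simp [h2, h]

theorem partA_eq_altPart (p : List Char) : partA p = altPart p := by
  have hsplit : PySem.Chars.splitMax? p [':'] 2 = some (spCol 2 p) := by
    simp [PySem.Chars.splitMax?, splitOnMax_eq_spCol]
  match p with
  | [] =>
    simp [partA, altPart, isin_single]
  | [c] =>
    by_cases hc : c = ':'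
    · subst hc
      simp [partA, altPart, hsplit, spCol, spCol_zero, isin_single]
    · have hin : PySem.Chars.isIn [':'] [c] = false := by
        rw [isin_single]
        simp
        exact fun h => hc h.symm
      simp [partA, altPart, hin]
  | c0 :: c1 :: rest =>
    by_cases hc1 : c1 = ':'
    · subst hc1
      by_cases hc0 : c0 = ':'
      · subst hc0
        -- category is empty → False on A's side; prefix not in {"L:","M:","S:"} on B's side
        simp [partA, altPart, hsplit, spCol, spCol_zero, isin_single]
      · -- part looks like c0 ':' rest
        by_cases hr : ':' ∈ rest
        · obtain ⟨a, b, hab⟩ : ∃ a b, spCol 1 rest = [a, b] := by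
            clear hsplit
            induction rest with
            | nil => simp at hr
            | cons d ds ihd =>
              by_cases hd : d = ':'
              · exact ⟨[], ds, by simp [spCol, hd, spCol_zero]⟩
              · have hr' : ':' ∈ ds := by
                  rcases List.mem_cons.mp hr with h | h
                  · exact absurd h.symm hd
                  · exact h
                obtain ⟨a, b, hab⟩ := ihd hr'
                exact ⟨d :: a, b, by simp [spCol, hd, hab]⟩
          have hsp : spCol 2 (c0 :: ':' :: rest) = [[c0], a, b] := by
            simp [spCol, hc0, hab]
          simp [partA, altPart, hsplit, hsp, isin_single, hr]
        · have hsp1 : spCol 1 rest = [rest] := by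
            clear hsplit
            induction rest with
            | nil => simp [spCol]
            | cons d ds ihd =>
              have hd : d ≠ ':' := fun h => hr (by simp [h])
              have : ':' ∉ ds := fun h => hr (by simp [h])
              simp [spCol, hd, ihd this]
          have hsp : spCol 2 (c0 :: ':' :: rest) = [[c0], rest] := by
            simp [spCol, hc0, hsp1]
          simp [partA, altPart, hsplit, hsp, isin_single, hr]
    · -- second char is not ':' → B false; A's category has length ≥ 2 or unpack fails
      by_cases hc0 : c0 = ':'
      · subst hc0
        obtain ⟨a, b, hab⟩ : ∃ a b, spCol 1 (c1 :: rest) = a :: b := by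
          cases hx : spCol 1 (c1 :: rest) with
          | nil => exact absurd hx (spCol_ne_nil _ _)
          | cons x y => exact ⟨x, y, rfl⟩
        have hsp0 : spCol 2 (':' :: c1 :: rest) = [] :: spCol 1 (c1 :: rest) := by
          simp [spCol]
        have hsp : spCol 2 (':' :: c1 :: rest) = [] :: a :: b := by rw [hsp0, hab]
        rcases b with _ | ⟨b1, _ | ⟨b2, b3⟩⟩ <;>
          simp [partA, altPart, hsplit, hsp, isin_single, hc1]
      · obtain ⟨a, b, hab⟩ : ∃ a b, spCol 2 rest = a :: b := by
          cases hx : spCol 2 rest with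
          | nil => exact absurd hx (spCol_ne_nil _ _)
          | cons x y => exact ⟨x, y, rfl⟩
        have hsp : spCol 2 (c0 :: c1 :: rest) = (c0 :: c1 :: a) :: b := by
          simp [spCol, hc0, hc1, hab]
        rcases b with _ | ⟨b1, _ | ⟨b2, _ | ⟨b4, b5⟩⟩⟩ <;>
          simp [partA, altPart, hsplit, hsp, isin_single, hc1]

theorem goA_eq_all (l : List (List Char)) : goA l = l.all altPart := by
  induction l with
  | nil => simp [goA]
  | cons p rest ih =>
    simp only [goA, List.all_cons, partA_eq_altPart, ih]
    by_cases h : altPart p <;> simp [h]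

-- ===== VERDICT (by name: the statement is the Claim_ definition above) =====
theorem validate_symbolic_structure_spec : Claim_equal_validate_symbolic_structure := by
  intro s _
  unfold Spec_validate_symbolic_structure
  unfold validate_symbolic_structure validate_symbolic_structure_alt
  split
  · rfl
  · exact goA_eq_all _
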